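-- pv_equiv track=rewrite | github.com/yasufumi-nakata/Pytra | src/backends/cpp/emitter/header_builder.py | _namespace_body_span
-- ===== SOURCE A (Python) =====
-- def _namespace_body_span(lines: list[str], top_namespace: str) -> tuple[int, int]:
--     """namespace 本体行範囲（start, end）を返す。未解決時は全体範囲。"""
--     if len(lines) == 0:
--         return -1, -1
--     ns = top_namespace.strip()
--     if ns == "":
--         return 0, len(lines)
--     ns_open = "namespace " + ns + " {"
--     ns_idx = -1
--     for i, raw in enumerate(lines):
--         if raw.strip() == ns_open:
--             ns_idx = i
--             break
--     if ns_idx < 0: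
--         return 0, len(lines)
--     start = ns_idx + 1
--     end = len(lines)
--     depth = lines[ns_idx].count("{") - lines[ns_idx].count("}")
--     for i in range(ns_idx + 1, len(lines)):
--         depth += lines[i].count("{") - lines[i].count("}")
--         if depth <= 0:
--             end = i
--             break
--     for i in range(start, end):
--         if "static void __pytra_module_init()" in lines[i]:
--             end = i
--             break
--     return start, end
-- ===== SOURCE B (Python) =====
-- def _namespace_body_span(lines: list[str], top_namespace: str) -> tuple[int, int]:
--     """Locate the namespace line via a strip-map + list.index, then one structural
--     scan over the suffix with a per-character brace counter (marker test first)."""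
--     if not lines:
--         return (-1, -1)
--     ns = top_namespace.strip()
--     if not ns:
--         return (0, len(lines))
--     target = "namespace " + ns + " {"
--     stripped = [l.strip() for l in lines]
--     if target not in stripped:
--         return (0, len(lines))
--     ns_idx = stripped.index(target)
--     start = ns_idx + 1
--     depth = 0
--     for ch in lines[ns_idx]:
--         if ch == '{':
--             depth += 1
--         elif ch == '}':
--             depth -= 1
--     end = len(lines)
--     i = start
--     for line in lines[start:]:
--         if "static void __pytra_module_init()" in line:
--             end = i
--             break
--         for ch in line:
--             if ch == '{':
--                 depth += 1
--             elif ch == '}':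
--                 depth -= 1
--         if depth <= 0:
--             end = i
--             break
--         i += 1
--     return (start, end)
-- ===== Notes on version B (the rewrite author's own statement) =====
-- stated objective: alternative
-- what changed: A's three index loops (linear search for the namespace-open line, a brace-depth pass with str.count, then a separate init-marker pass over the resulting range) are replaced by a strip-map with list.index to find the namespace line and ONE structural scan over the suffix list that tests the marker first and maintains the depth with a per-character brace counter instead of two str.count calls.
import Mathlib
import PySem

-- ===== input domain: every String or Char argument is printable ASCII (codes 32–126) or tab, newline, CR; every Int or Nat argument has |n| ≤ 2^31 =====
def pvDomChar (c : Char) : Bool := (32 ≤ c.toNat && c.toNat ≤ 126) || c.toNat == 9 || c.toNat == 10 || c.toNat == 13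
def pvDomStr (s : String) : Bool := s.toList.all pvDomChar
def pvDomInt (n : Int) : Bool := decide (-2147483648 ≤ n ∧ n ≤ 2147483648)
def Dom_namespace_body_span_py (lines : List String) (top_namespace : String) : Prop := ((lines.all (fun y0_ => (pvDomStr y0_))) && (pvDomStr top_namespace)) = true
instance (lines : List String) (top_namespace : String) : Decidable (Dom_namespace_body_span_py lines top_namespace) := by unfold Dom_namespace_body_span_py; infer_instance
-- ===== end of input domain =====

-- B replaces A's three index loops by a strip-map + index to find the namespace line and one
-- structural scan over the suffix (marker first, per-character brace counter); same cost, alternative decomposition.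

-- ===== PORT A =====
-- brace delta of one line: line.count("{") - line.count("}")
def pvDeltaA (s : String) : Int :=
  (PySem.Str.count s "{" : Int) - (PySem.Str.count s "}" : Int)

-- A's first loop: first index whose stripped line equals ns_open, else -1
def pvFindNsA (lines : List String) (target : String) (i : Nat) : Int :=
  match lines with
  | [] => -1
  | raw :: rest =>
      if PySem.Str.strip raw == target then (i : Int)
      else pvFindNsA rest target (i + 1)

-- A's second loop: for i in range(i0, n): depth += delta; if depth <= 0: end = i; break   (default end = n)
def pvDepthLoopA (lines : List String) (n : Nat) (d : Int) (i : Nat) : Nat :=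
  if i < n then
    let d' := d + pvDeltaA (PySem.List.pyGetD lines (i : Int) "")
    if d' ≤ 0 then i else pvDepthLoopA lines n d' (i + 1)
  else n
termination_by n - i

-- A's third loop: for i in range(start, e): if marker in lines[i]: end = i; break   (default end = e)
def pvMarkerLoopA (lines : List String) (e : Nat) (i : Nat) : Nat :=
  if i < e then
    if PySem.Str.isIn "static void __pytra_module_init()" (PySem.List.pyGetD lines (i : Int) "") then i
    else pvMarkerLoopA lines e (i + 1)
  else e
termination_by e - i

def namespace_body_span_py (lines : List String) (top_namespace : String) : Int × Int :=
  if lines.length = 0 then (-1, -1)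
  else
    let ns := PySem.Str.strip top_namespace
    if ns == "" then (0, (lines.length : Int))
    else
      let nsOpen := "namespace " ++ ns ++ " {"
      let nsIdx := pvFindNsA lines nsOpen 0
      if nsIdx < 0 then (0, (lines.length : Int))
      else
        let start := nsIdx + 1
        let d0 := pvDeltaA (PySem.List.pyGetD lines nsIdx "")
        let e1 := pvDepthLoopA lines lines.length d0 (nsIdx.toNat + 1)
        let e2 := pvMarkerLoopA lines e1 (nsIdx.toNat + 1)
        (start, (e2 : Int))

-- ===== PORT B =====
-- B's per-character depth counter: for ch in line: if ch=='{': d+=1 elif ch=='}': d-=1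
def pvCharStep (d : Int) (c : Char) : Int :=
  if c = '{' then d + 1 else if c = '}' then d - 1 else d

-- B's single structural scan over the remaining lines (marker test first)
def pvScanB (rest : List String) (i : Nat) (d : Int) (dflt : Nat) : Nat :=
  match rest with
  | [] => dflt
  | line :: t =>
      if PySem.Str.isIn "static void __pytra_module_init()" line then i
      else
        let d' := line.toList.foldl pvCharStep d
        if d' ≤ 0 then i else pvScanB t (i + 1) d' dflt

def namespace_body_span_py_alt (lines : List String) (top_namespace : String) : Int × Int :=
  if lines.length = 0 then (-1, -1)
  else
    let ns := PySem.Str.strip top_namespace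
    if ns == "" then (0, (lines.length : Int))
    else
      let target := "namespace " ++ ns ++ " {"
      let stripped := lines.map PySem.Str.strip
      match PySem.List.index? stripped target with
      | none => (0, (lines.length : Int))
      | some k =>
          let d0 := (lines.getD k "").toList.foldl pvCharStep 0
          let e := pvScanB (lines.drop (k + 1)) (k + 1) d0 lines.length
          ((k : Int) + 1, (e : Int))

-- ===== PRECONDITION & SPEC =====
def Spec_namespace_body_span_py (lines : List String) (top_namespace : String) (out : Int × Int) : Prop := out = namespace_body_span_py_alt lines top_namespace
instance (lines : List String) (top_namespace : String) (out : Int × Int) : Decidable (Spec_namespace_body_span_py lines top_namespace out) := by unfold Spec_namespace_body_span_py; infer_instance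

-- ===== CLAIM =====
def Claim_equal_namespace_body_span_py : Prop := ∀ (lines : List String) (top_namespace : String), Dom_namespace_body_span_py lines top_namespace → Spec_namespace_body_span_py lines top_namespace (namespace_body_span_py lines top_namespace)

-- ===== LEMMAS AND PROOFS =====

-- the per-character fold computes A's count-based delta
lemma pvCharFold_eq (cs : List Char) (d : Int) :
    cs.foldl pvCharStep d = d + ((cs.count '{' : Int) - (cs.count '}' : Int)) := by
  induction cs generalizing d with
  | nil => simp
  | cons c t ih =>
      simp only [List.foldl_cons, ih, List.count_cons, pvCharStep]
      split_ifs with h1 h2 <;> simp_all <;> ring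

-- PySem.Chars.count.go for a single-character needle counts occurrences of that character
lemma pvGo_single (c : Char) (l : List Char) (fuel acc : Nat) (h : l.length ≤ fuel) :
    PySem.Chars.count.go [c] fuel l acc = acc + l.count c := by
  induction l generalizing fuel acc with
  | nil => cases fuel <;> simp [PySem.Chars.count.go]
  | cons x t ih =>
      cases fuel with
      | zero => simp at h
      | succ f =>
          rw [PySem.Chars.count.go]
          by_cases hx : x = c
          · subst hx
            simp [List.isPrefixOf, ih _ _ (by simpa using h)]
            omega
          · simp [List.isPrefixOf, hx, ih _ _ (by simpa using h), Ne.symm hx]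

lemma pvCount_single (cs : List Char) (c : Char) : PySem.Chars.count cs [c] = cs.count c := by
  simp [PySem.Chars.count, pvGo_single c cs cs.length 0 le_rfl]

lemma pvDelta_eq (s : String) : s.toList.foldl pvCharStep 0 = pvDeltaA s := by
  have h1 : "{".toList = ['{'] := rfl
  have h2 : "}".toList = ['}'] := rfl
  rw [pvCharFold_eq, pvDeltaA, PySem.Str.count_eq, PySem.Str.count_eq, h1, h2,
    pvCount_single, pvCount_single, zero_add]

-- index? on the stripped map agrees with A's search loop
lemma pvIndex_eq (lines : List String) (target : String) (i : Nat) :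
    pvFindNsA lines target i =
      match PySem.List.index? (lines.map PySem.Str.strip) target with
      | none => -1
      | some k => ((k + i : Nat) : Int) := by
  induction lines generalizing i with
  | nil => rfl
  | cons raw rest ih =>
      simp only [pvFindNsA, List.map_cons]
      by_cases h : PySem.Str.strip raw == target
      · rw [if_pos h]
        have he : PySem.Str.strip raw = target := eq_of_beq h
        rw [he, PySem.List.index?_cons_self]
        simp
      · rw [if_neg h]
        have hne : PySem.Str.strip raw ≠ target := fun he => h (by simp [he])
        rw [PySem.List.index?_cons_of_ne _ hne, ih (i + 1)]
        cases PySem.List.index? (rest.map PySem.Str.strip) target with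
        | none => rfl
        | some k =>
            show ((k + (i + 1) : Nat) : Int) = ((k + 1 + i : Nat) : Int)
            congr 1
            omega

lemma pvDepthA_lt (lines : List String) (n : Nat) (d : Int) (i : Nat) (hi : i < n) :
    pvDepthLoopA lines n d i =
      if d + pvDeltaA (PySem.List.pyGetD lines (i : Int) "") ≤ 0 then i
      else pvDepthLoopA lines n (d + pvDeltaA (PySem.List.pyGetD lines (i : Int) "")) (i + 1) := by
  rw [pvDepthLoopA, if_pos hi]

lemma pvDepthA_ge (lines : List String) (n : Nat) (d : Int) (i : Nat) (h : ¬ i < n) :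
    pvDepthLoopA lines n d i = n := by
  rw [pvDepthLoopA, if_neg h]

lemma pvMarkerA_lt (lines : List String) (e : Nat) (i : Nat) (hi : i < e) :
    pvMarkerLoopA lines e i =
      if PySem.Str.isIn "static void __pytra_module_init()" (PySem.List.pyGetD lines (i : Int) "") then i
      else pvMarkerLoopA lines e (i + 1) := by
  rw [pvMarkerLoopA, if_pos hi]

lemma pvMarkerA_ge (lines : List String) (e : Nat) (i : Nat) (h : ¬ i < e) :
    pvMarkerLoopA lines e i = e := by
  rw [pvMarkerLoopA, if_neg h]

lemma pvDepthLoopA_ge (lines : List String) (n : Nat) (d : Int) (i : Nat)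
    (h : i ≤ n) : i ≤ pvDepthLoopA lines n d i := by
  fun_induction pvDepthLoopA lines n d i with
  | case1 => omega
  | case2 d i hlt d' hnle ih => exact le_trans (by omega) (ih (by omega))
  | case3 => omega

-- B's structural scan equals A's depth loop followed by A's marker loop
lemma pvScan_eq (lines : List String) (d : Int) (i : Nat) :
    pvScanB (lines.drop i) i d lines.length =
      pvMarkerLoopA lines (pvDepthLoopA lines lines.length d i) i := by
  have main : ∀ (k i : Nat) (d : Int), lines.length - i ≤ k →
      pvScanB (lines.drop i) i d lines.length =
        pvMarkerLoopA lines (pvDepthLoopA lines lines.length d i) i := by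
    intro k
    induction k with
    | zero =>
        intro i d h
        have hge : lines.length ≤ i := by omega
        rw [List.drop_eq_nil_of_le hge, pvDepthA_ge lines _ _ _ (by omega),
          pvMarkerA_ge lines _ _ (by omega)]
        rfl
    | succ k ih =>
        intro i d h
        by_cases hi : i < lines.length
        · have hget : lines[i] = PySem.List.pyGetD lines (i : Int) "" := by
            rw [PySem.List.pyGetD_natCast, List.getD_eq_getElem lines "" hi]
          rw [List.drop_eq_getElem_cons hi]
          show (if PySem.Str.isIn "static void __pytra_module_init()" lines[i] then i
                else if lines[i].toList.foldl pvCharStep d ≤ 0 then i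
                else pvScanB (lines.drop (i + 1)) (i + 1)
                  (lines[i].toList.foldl pvCharStep d) lines.length) = _
          have hdv : lines[i].toList.foldl pvCharStep d
              = d + pvDeltaA (PySem.List.pyGetD lines (i : Int) "") := by
            rw [pvCharFold_eq]
            have := pvDelta_eq lines[i]
            rw [pvCharFold_eq, zero_add] at this
            rw [this, hget]
          rw [hdv, hget]
          by_cases hm : PySem.Str.isIn "static void __pytra_module_init()"
              (PySem.List.pyGetD lines (i : Int) "")
          · rw [if_pos hm, pvDepthA_lt lines _ _ _ hi]
            by_cases hd : d + pvDeltaA (PySem.List.pyGetD lines (i : Int) "") ≤ 0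
            · rw [if_pos hd, pvMarkerA_ge lines _ _ (by omega)]
            · rw [if_neg hd]
              have hge2 := pvDepthLoopA_ge lines lines.length
                (d + pvDeltaA (PySem.List.pyGetD lines (i : Int) "")) (i + 1) (by omega)
              rw [pvMarkerA_lt lines
                (pvDepthLoopA lines lines.length
                  (d + pvDeltaA (PySem.List.pyGetD lines (i : Int) "")) (i + 1)) i (by omega),
                if_pos hm]
          · rw [if_neg hm, pvDepthA_lt lines _ _ _ hi]
            by_cases hd : d + pvDeltaA (PySem.List.pyGetD lines (i : Int) "") ≤ 0
            · rw [if_pos hd, if_pos hd, pvMarkerA_ge lines _ _ (by omega)]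
            · rw [if_neg hd, if_neg hd, ih (i + 1) _ (by omega)]
              have hge2 := pvDepthLoopA_ge lines lines.length
                (d + pvDeltaA (PySem.List.pyGetD lines (i : Int) "")) (i + 1) (by omega)
              conv_rhs => rw [pvMarkerA_lt lines
                (pvDepthLoopA lines lines.length
                  (d + pvDeltaA (PySem.List.pyGetD lines (i : Int) "")) (i + 1)) i (by omega)]
              rw [if_neg hm]
        · rw [List.drop_eq_nil_of_le (by omega), pvDepthA_ge lines _ _ _ hi,
            pvMarkerA_ge lines _ _ (by omega)]
          rfl
  exact main (lines.length - i) i d le_rfl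

-- A's search loop started at 0, phrased through index? on the stripped map
lemma pvIndex0 (lines : List String) (target : String) :
    pvFindNsA lines target 0 =
      match PySem.List.index? (lines.map PySem.Str.strip) target with
      | none => -1
      | some k => (k : Int) := by
  rw [pvIndex_eq]
  cases PySem.List.index? (lines.map PySem.Str.strip) target <;> simp

-- ===== VERDICT =====
theorem namespace_body_span_py_spec : Claim_equal_namespace_body_span_py := by
  intro lines top_namespace _
  unfold Spec_namespace_body_span_py namespace_body_span_py namespace_body_span_py_alt
  by_cases h0 : lines.length = 0
  · simp [h0]
  rw [if_neg h0, if_neg h0]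
  by_cases hns : PySem.Str.strip top_namespace == ""
  · rw [if_pos hns, if_pos hns]
  rw [if_neg hns, if_neg hns]
  show (let nsIdx := pvFindNsA lines ("namespace " ++ PySem.Str.strip top_namespace ++ " {") 0
        if nsIdx < 0 then ((0 : Int), (lines.length : Int))
        else (nsIdx + 1,
          ((pvMarkerLoopA lines
            (pvDepthLoopA lines lines.length (pvDeltaA (PySem.List.pyGetD lines nsIdx "")) (nsIdx.toNat + 1))
            (nsIdx.toNat + 1) : Nat) : Int)))
    = (match PySem.List.index? (lines.map PySem.Str.strip)
          ("namespace " ++ PySem.Str.strip top_namespace ++ " {") with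
       | none => ((0 : Int), (lines.length : Int))
       | some k => ((k : Int) + 1,
          ((pvScanB (lines.drop (k + 1)) (k + 1)
            ((lines.getD k "").toList.foldl pvCharStep 0) lines.length : Nat) : Int)))
  rw [pvIndex0 lines ("namespace " ++ PySem.Str.strip top_namespace ++ " {")]
  cases hidx : PySem.List.index? (lines.map PySem.Str.strip)
      ("namespace " ++ PySem.Str.strip top_namespace ++ " {") with
  | none => norm_num
  | some k =>
      show (if (k : Int) < 0 then ((0 : Int), (lines.length : Int))
        else ((k : Int) + 1,
          ((pvMarkerLoopA lines
            (pvDepthLoopA lines lines.length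
              (pvDeltaA (PySem.List.pyGetD lines ((k : Int)) "")) (((k : Int)).toNat + 1))
            (((k : Int)).toNat + 1) : Nat) : Int)))
        = ((k : Int) + 1,
          ((pvScanB (lines.drop (k + 1)) (k + 1)
            ((lines.getD k "").toList.foldl pvCharStep 0) lines.length : Nat) : Int))
      rw [if_neg (by omega), Int.toNat_natCast, PySem.List.pyGetD_natCast, pvDelta_eq,
        pvScan_eq]
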